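-- pv_equiv track=rewrite | github.com/thmanos/cost-benefit-calculator-v1 | volume/fastapi-app/app/source/classes/amFormulas.py | getSplittedFormula
-- ===== SOURCE A (Python) =====
-- def getSplittedFormula( myList ):
--     myFormulaSplit     = [];
--     myChars            = "";
--     myDigits           = "";
--
--     # Split our Formula into an Array that differentiates the integer part of the formula from the rest
--     for index , char in enumerate( myList ):
--         if char.isnumeric() == False :
--             if myDigits != "" :
--                 myFormulaSplit.append( myDigits );
--                 myDigits = "";
--
--             myChars += char;
--         else:
--             if myChars != "" :
--                 myFormulaSplit.append( myChars );
--                 myChars = "";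
--
--             myDigits += char;
--
--         if index == ( len( myList ) - 1 ) :
--              if myDigits != "" :
--                  myFormulaSplit.append( myDigits );
--              else:
--                  myFormulaSplit.append( myChars );
--
--     return myFormulaSplit;
-- ===== SOURCE B (Python) =====
-- def getSplittedFormula(myList):
--     n = len(myList)
--     if n == 0:
--         return []
--     # staged passes: first compute the boundary indices where the numeric/non-numeric
--     # class changes, then cut the string at those indices.
--     cuts = [i for i in range(1, n) if myList[i].isnumeric() != myList[i - 1].isnumeric()]
--     bounds = [0] + cuts + [n]
--     return [myList[a:b] for a, b in zip(bounds, bounds[1:])]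
-- ===== Notes on version B (the rewrite author's own statement) =====
-- stated objective: alternative
-- what changed: Replaces A's single pass with two running buffers and manual flush-on-transition / last-index logic by a staged two-pass algorithm: first collect the boundary indices where adjacent characters change isnumeric class, then slice the string at those indices.
import Mathlib
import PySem

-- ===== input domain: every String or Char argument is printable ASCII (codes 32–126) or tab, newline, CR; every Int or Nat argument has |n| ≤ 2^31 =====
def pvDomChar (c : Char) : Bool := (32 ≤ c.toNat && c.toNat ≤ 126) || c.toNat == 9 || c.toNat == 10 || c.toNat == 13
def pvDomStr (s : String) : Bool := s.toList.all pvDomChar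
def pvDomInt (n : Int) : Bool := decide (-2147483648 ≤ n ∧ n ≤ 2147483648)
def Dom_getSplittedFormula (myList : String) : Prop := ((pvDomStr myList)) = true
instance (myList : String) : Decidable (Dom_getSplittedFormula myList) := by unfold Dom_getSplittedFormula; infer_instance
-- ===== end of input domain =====

-- B: a staged two-pass algorithm — first compute the boundary indices where the
-- numeric/non-numeric class of adjacent characters changes, then cut the string at
-- those indices — instead of A's single pass with two running buffers and manual
-- flush-on-transition / last-index logic; alternative decomposition, same cost.


-- ===== PORT A =====
-- char.isnumeric(): exact on the ASCII domain, where isnumeric coincides with isdigit.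
def pyIsNumeric (c : Char) : Bool := PySem.Chars.isdigit c

-- A's loop, step for step; strings are handled as char lists (PySem convention); the
-- Python `index == len(myList) - 1` test is the `rest = []` case of the current step.
def loopA : List Char → List String → List Char → List Char → List String
  | [], acc, _, _ => acc
  | c :: rest, acc, chars, digits =>
    if pyIsNumeric c = false then
      let acc' := if digits ≠ [] then acc ++ [String.mk digits] else acc
      let chars' := chars ++ [c]
      if rest = [] then
        acc' ++ [String.mk chars']        -- digits' is "" here, so the final flush appends chars'
      else
        loopA rest acc' chars' []
    else
      let acc' := if chars ≠ [] then acc ++ [String.mk chars] else acc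
      let digits' := digits ++ [c]
      if rest = [] then
        acc' ++ [String.mk digits']       -- digits' is nonempty here
      else
        loopA rest acc' [] digits'

def getSplittedFormula (myList : String) : List String :=
  loopA myList.toList [] [] []

-- ===== PORT B =====
-- B pass 1: `[i for i in range(1, n) if myList[i].isnumeric() != myList[i-1].isnumeric()]`;
-- the indices i and i-1 are always in range, so List.getD is exact here.
def cutsB (l : List Char) : List Nat :=
  (List.range' 1 (l.length - 1)).filter
    (fun i => pyIsNumeric (l.getD i ' ') != pyIsNumeric (l.getD (i - 1) ' '))

-- B pass 2: slice at the bounds; `myList[a:b]` with 0 ≤ a ≤ b ≤ n is exactly take/drop.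
def getSplittedFormula_alt (myList : String) : List String :=
  let l := myList.toList
  if l.length = 0 then []
  else
    let bounds := [0] ++ cutsB l ++ [l.length]
    (bounds.zip bounds.tail).map (fun ab => String.mk ((l.drop ab.1).take (ab.2 - ab.1)))

-- ===== PRECONDITION & SPEC =====
def Spec_getSplittedFormula (myList : String) (out : List String) : Prop := out = getSplittedFormula_alt myList
instance (myList : String) (out : List String) : Decidable (Spec_getSplittedFormula myList out) := by unfold Spec_getSplittedFormula; infer_instance

-- ===== CLAIM (what is proved, stated in full; the proofs are below) =====
def Claim_equal_getSplittedFormula : Prop := ∀ (myList : String), Dom_getSplittedFormula myList → Spec_getSplittedFormula myList (getSplittedFormula myList)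

-- ===== LEMMAS AND PROOFS =====

-- proof-only characterisation: the maximal runs of equal isnumeric-class
def groupRuns (l : List Char) : List (List Char) :=
  match l with
  | [] => []
  | c :: rest =>
    (c :: rest.takeWhile (fun d => pyIsNumeric d == pyIsNumeric c)) ::
      groupRuns (rest.dropWhile (fun d => pyIsNumeric d == pyIsNumeric c))
termination_by l.length
decreasing_by
  simpa using Nat.lt_succ_of_le (List.length_dropWhile_le _ _)

theorem groupRuns_nil : groupRuns [] = [] := by rw [groupRuns.eq_def]

theorem groupRuns_cons (c : Char) (rest : List Char) :
    groupRuns (c :: rest) =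
      (c :: rest.takeWhile (fun d => pyIsNumeric d == pyIsNumeric c)) ::
        groupRuns (rest.dropWhile (fun d => pyIsNumeric d == pyIsNumeric c)) := by
  rw [groupRuns.eq_def]

-- ---- A-side: loopA produces the runs ----

-- proof-only intermediate grouping: the current (nonempty, homogeneous) run plus the rest
def groupCont (run : List Char) : List Char → List (List Char)
  | [] => [run]
  | c :: rest =>
    if pyIsNumeric c = pyIsNumeric run.headI then groupCont (run ++ [c]) rest
    else run :: groupCont [c] rest

theorem loopA_eq_groupCont (l : List Char) (hl : l ≠ []) :
    ∀ (acc : List String) (run : List Char) (b : Bool), run ≠ [] →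
      (∀ c ∈ run, pyIsNumeric c = b) →
      loopA l acc (if b then [] else run) (if b then run else []) =
        acc ++ (groupCont run l).map String.mk := by
  induction l with
  | nil => exact absurd rfl hl
  | cons c rest ih =>
    intro acc run b hrun hhom
    have hhead : pyIsNumeric run.headI = b := by
      cases run with
      | nil => exact absurd rfl hrun
      | cons r rs => exact hhom r (List.mem_cons_self)
    cases rest with
    | nil =>
      cases b <;> simp only [loopA, groupCont, hhead] <;>
        by_cases hc : pyIsNumeric c = false <;>
        simp_all [groupCont]
    | cons c' rest' =>
      have hne : (c' :: rest') ≠ ([] : List Char) := by simp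
      by_cases hc : pyIsNumeric c = b
      · -- same class: run grows
        have := ih hne acc (run ++ [c]) b (by simp)
          (by intro x hx; rcases List.mem_append.mp hx with h | h
              · exact hhom x h
              · simp at h; simpa [h] using hc)
        cases b <;> simp_all [loopA, groupCont]
      · -- transition: flush run, start new run [c]
        have := ih hne (acc ++ [String.mk run]) [c] (!b) (by simp)
          (by intro x hx; simp at hx; subst hx; revert hc; cases b <;> simp)
        cases b <;> simp_all [loopA, groupCont]

theorem groupCont_eq_groupRuns (l : List Char) :
    ∀ (run : List Char) (b : Bool), run ≠ [] → (∀ c ∈ run, pyIsNumeric c = b) →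
      groupCont run l = groupRuns (run ++ l) := by
  induction l with
  | nil =>
    intro run b hrun hhom
    cases run with
    | nil => exact absurd rfl hrun
    | cons r rs =>
      have : rs.takeWhile (fun d => pyIsNumeric d == pyIsNumeric r) = rs :=
        List.takeWhile_eq_self_iff.mpr (by
          intro x hx
          simp [hhom x (List.mem_cons_of_mem r hx), hhom r (List.mem_cons_self)])
      have hd : rs.dropWhile (fun d => pyIsNumeric d == pyIsNumeric r) = [] :=
        List.dropWhile_eq_nil_iff.mpr (by
          intro x hx
          simp [hhom x (List.mem_cons_of_mem r hx), hhom r (List.mem_cons_self)])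
      rw [groupCont, List.append_nil, groupRuns_cons, this, hd, groupRuns_nil]
  | cons c rest ih =>
    intro run b hrun hhom
    have hhead : pyIsNumeric run.headI = b := by
      cases run with
      | nil => exact absurd rfl hrun
      | cons r rs => exact hhom r (List.mem_cons_self)
    by_cases hc : pyIsNumeric c = b
    · have := ih (run ++ [c]) b (by simp)
        (by intro x hx; rcases List.mem_append.mp hx with h | h
            · exact hhom x h
            · simp at h; simpa [h] using hc)
      simp only [groupCont, hhead, hc]
      rw [this, List.append_assoc]
      rfl
    · cases run with
      | nil => exact absurd rfl hrun
      | cons r rs =>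
        have hr : pyIsNumeric r = b := hhom r (List.mem_cons_self)
        have htw : (rs ++ c :: rest).takeWhile (fun d => pyIsNumeric d == pyIsNumeric r) = rs := by
          rw [List.takeWhile_append_of_pos (by
            intro x hx; simp [hhom x (List.mem_cons_of_mem r hx), hr])]
          simp [hr, hc]
        have hdw : (rs ++ c :: rest).dropWhile (fun d => pyIsNumeric d == pyIsNumeric r) = c :: rest := by
          rw [List.dropWhile_append_of_pos (by
            intro x hx; simp [hhom x (List.mem_cons_of_mem r hx), hr])]
          simp [hr, hc]
        have hih := ih [c] (!b) (by simp)
          (by simp only [List.mem_singleton]; rintro x rfl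
              cases b <;> cases hpc : pyIsNumeric x <;> simp_all)
        simp only [groupCont, hhead, hc, if_false]
        rw [List.cons_append, groupRuns_cons, htw, hdw, hih]
        simp

theorem loopA_eq_groupRuns (l : List Char) :
    loopA l [] [] [] = (groupRuns l).map String.mk := by
  cases l with
  | nil => simp [loopA, groupRuns_nil]
  | cons c rest =>
    cases rest with
    | nil =>
      by_cases hc : pyIsNumeric c = false <;>
        simp [loopA, groupRuns_cons, groupRuns_nil, hc]
    | cons c' rest' =>
      have hne : (c' :: rest') ≠ ([] : List Char) := by simp
      have key := loopA_eq_groupCont (c' :: rest') hne [] [c] (pyIsNumeric c) (by simp)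
        (by intro x hx; simp at hx; simp [hx])
      have key2 := groupCont_eq_groupRuns (c' :: rest') [c] (pyIsNumeric c) (by simp)
        (by intro x hx; simp at hx; simp [hx])
      by_cases hc : pyIsNumeric c = false
      · simp only [loopA, hc, if_neg hne, ne_eq, not_true_eq_false, ite_false]
        simpa [hc, key2] using key
      · simp only [loopA, hc, if_neg hne]
        have hb : pyIsNumeric c = true := by revert hc; cases pyIsNumeric c <;> simp
        simp only [hb] at key key2
        simpa [key2] using key

-- ---- B-side: the cut-points slicing produces the runs ----

def sliceSeq (l : List Char) : Nat → List Nat → List (List Char)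
  | _, [] => []
  | a, b :: bs => (l.drop a).take (b - a) :: sliceSeq l b bs

theorem zip_map_eq_sliceSeq (l : List Char) :
    ∀ (bs : List Nat) (a : Nat),
      (((a :: bs).zip bs).map (fun ab => (l.drop ab.1).take (ab.2 - ab.1))) = sliceSeq l a bs := by
  intro bs
  induction bs with
  | nil => intro a; simp [sliceSeq]
  | cons b bs ih => intro a; simp [sliceSeq, ih]

theorem sliceSeq_shift (l : List Char) (k : Nat) :
    ∀ (bs : List Nat) (a : Nat),
      sliceSeq l (a + k) (bs.map (· + k)) = sliceSeq (l.drop k) a bs := by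
  intro bs
  induction bs with
  | nil => intro a; simp [sliceSeq]
  | cons b bs ih =>
    intro a
    simp only [List.map_cons, sliceSeq, ih, List.drop_drop]
    have h1 : b + k - (a + k) = b - a := by omega
    have h2 : a + k = k + a := by omega
    rw [h1, h2]

theorem dropWhile_head_false (p : Char → Bool) (rest : List Char) (d : Char) (dtl : List Char)
    (hdd : List.dropWhile p rest = d :: dtl) : p d = false := by
  induction rest with
  | nil => simp [List.dropWhile] at hdd
  | cons a l ih =>
    rw [List.dropWhile_cons] at hdd
    split at hdd
    · exact ih hdd
    · rename_i h; cases hdd; simpa using h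

-- the cut list of a string decomposes along its first run
theorem cutsB_decomp (c : Char) (rest : List Char) :
    cutsB (c :: rest) =
      (let run := c :: rest.takeWhile (fun d => pyIsNumeric d == pyIsNumeric c)
       let rest' := rest.dropWhile (fun d => pyIsNumeric d == pyIsNumeric c)
       if rest' = [] then [] else run.length :: (cutsB rest').map (· + run.length)) := by
  simp only []
  set p : Char → Bool := fun d => pyIsNumeric d == pyIsNumeric c with hp
  set tw := rest.takeWhile p with htw
  set dw := rest.dropWhile p with hdwdef
  set run : List Char := c :: tw with hrundef
  have hsplit : run ++ dw = c :: rest := by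
    rw [hrundef, List.cons_append, List.takeWhile_append_dropWhile]
  have hhom : ∀ x ∈ run, pyIsNumeric x = pyIsNumeric c := by
    intro x hx
    rcases List.mem_cons.mp hx with h | h
    · simp [h]
    · have := List.mem_takeWhile_imp h
      simpa [hp] using this
  have hk : run.length = tw.length + 1 := by simp [hrundef]
  have hrunget : ∀ i, i < run.length → pyIsNumeric ((c :: rest).getD i ' ') = pyIsNumeric c := by
    intro i hi
    rw [← hsplit, List.getD_append run dw ' ' i hi]
    have hmem : run.getD i ' ' ∈ run := by
      rw [List.getD_eq_getElem run ' ' hi]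
      exact List.getElem_mem hi
    exact hhom _ hmem
  cases hdw : dw with
  | nil =>
    have hlen : (c :: rest).length = run.length := by
      rw [← hsplit, hdw]; simp
    rw [if_pos rfl]
    unfold cutsB
    rw [List.filter_eq_nil_iff]
    intro i hi
    rw [List.mem_range'_1] at hi
    have h1 : i < run.length := by omega
    have h2 : i - 1 < run.length := by omega
    simp only [bne_iff_ne, ne_eq, Decidable.not_not]
    exact (hrunget i h1).trans (hrunget (i - 1) h2).symm
  | cons d dtl =>
    have hdnum : pyIsNumeric d ≠ pyIsNumeric c := by
      have hdd : List.dropWhile p rest = d :: dtl := by rw [← hdwdef]; exact hdw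
      have := dropWhile_head_false p rest d dtl hdd
      simpa [hp] using this
    have hlen : (c :: rest).length = run.length + dw.length := by
      rw [← hsplit]; simp
    have hgetR : ∀ j, ((c :: rest).getD (run.length + j) ' ') = dw.getD j ' ' := by
      intro j
      rw [← hsplit, List.getD_append_right run dw ' ' (run.length + j) (by omega)]
      congr 1
      omega
    rw [if_neg (by simp)]
    unfold cutsB
    have hm : dw.length = dtl.length + 1 := by rw [hdw]; simp
    have hn1 : (c :: rest).length - 1 = tw.length + (dtl.length + 1) := by omega
    rw [hn1, ← List.range'_append (s := 1) (m := tw.length) (n := dtl.length + 1) (step := 1),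
      List.filter_append]
    have hpart1 : (List.range' 1 tw.length).filter
        (fun i => pyIsNumeric ((c :: rest).getD i ' ') != pyIsNumeric ((c :: rest).getD (i - 1) ' ')) = [] := by
      rw [List.filter_eq_nil_iff]
      intro i hi
      rw [List.mem_range'_1] at hi
      have h1 : i < run.length := by omega
      have h2 : i - 1 < run.length := by omega
      simp only [bne_iff_ne, ne_eq, Decidable.not_not]
      exact (hrunget i h1).trans (hrunget (i - 1) h2).symm
    rw [hpart1, List.nil_append]
    have hs : 1 + 1 * tw.length = run.length := by omega
    rw [hs, List.range'_succ]
    have hqk : (pyIsNumeric ((c :: rest).getD run.length ' ') != pyIsNumeric ((c :: rest).getD (run.length - 1) ' ')) = true := by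
      have e0 : (c :: rest).getD run.length ' ' = d := by
        have := hgetR 0
        rw [Nat.add_zero] at this
        rw [this, hdw]; rfl
      have e1 : pyIsNumeric ((c :: rest).getD (run.length - 1) ' ') = pyIsNumeric c :=
        hrunget (run.length - 1) (by omega)
      rw [e0, e1]
      simpa using hdnum
    rw [List.filter_cons, if_pos hqk]
    congr 1
    have hrange : List.range' (run.length + 1) dtl.length 1 = (List.range' 1 dtl.length).map (· + run.length) := by
      rw [List.range'_eq_map_range, List.range'_eq_map_range, List.map_map]
      congr 1
      funext x
      simp only [Function.comp_apply]
      omega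
    rw [hrange, List.filter_map]
    rw [List.filter_congr (q := fun i => pyIsNumeric (dw.getD i ' ') != pyIsNumeric (dw.getD (i - 1) ' '))
      (by
        intro i hi
        rw [List.mem_range'_1] at hi
        simp only [Function.comp_apply]
        have e2 : (c :: rest).getD (i + run.length) ' ' = dw.getD i ' ' := by
          rw [← hgetR i, Nat.add_comm]
        have e3 : (c :: rest).getD (i + run.length - 1) ' ' = dw.getD (i - 1) ' ' := by
          have : i + run.length - 1 = run.length + (i - 1) := by omega
          rw [this, hgetR (i - 1)]
        rw [e2, e3])]
    have h5 : dw.length - 1 = dtl.length := by omega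
    rw [← h5, ← hdw]

theorem sliceSeq_eq_groupRuns_aux (n : Nat) : ∀ l : List Char, l.length ≤ n → l ≠ [] →
    sliceSeq l 0 (cutsB l ++ [l.length]) = groupRuns l := by
  induction n with
  | zero =>
    intro l h hl
    cases l with
    | nil => exact absurd rfl hl
    | cons c rest => simp at h
  | succ n ih =>
    intro l hle hl
    cases l with
    | nil => exact absurd rfl hl
    | cons c rest =>
      rw [cutsB_decomp, groupRuns_cons]
      simp only []
      set p : Char → Bool := fun d => pyIsNumeric d == pyIsNumeric c with hp
      set tw := rest.takeWhile p with htw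
      set dw := rest.dropWhile p with hdwdef
      set run : List Char := c :: tw with hrundef
      have hsplit : run ++ dw = c :: rest := by
        rw [hrundef, List.cons_append, List.takeWhile_append_dropWhile]
      cases hdw : dw with
      | nil =>
        have hr : run = c :: rest := by rw [← hsplit, hdw, List.append_nil]
        rw [if_pos rfl, List.nil_append]
        simp only [sliceSeq]
        rw [List.drop_zero, Nat.sub_zero, List.take_length, groupRuns_nil, hr]
      | cons d dtl =>
        have hsplit2 : run ++ (d :: dtl) = c :: rest := by rw [← hdw]; exact hsplit
        have hlen2 : (c :: rest).length = run.length + (d :: dtl).length := by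
          rw [← hsplit2]; simp
        rw [if_neg (by simp)]
        have htail : (cutsB (d :: dtl)).map (· + run.length) ++ [(c :: rest).length] =
            (cutsB (d :: dtl) ++ [(d :: dtl).length]).map (· + run.length) := by
          rw [List.map_append]
          simp only [List.map_cons, List.map_nil]
          congr 2
          omega
        rw [List.cons_append, htail]
        simp only [sliceSeq]
        rw [List.drop_zero, Nat.sub_zero]
        have htake : (c :: rest).take run.length = run := by
          rw [← hsplit2, List.take_left]
        have hdrop : (c :: rest).drop run.length = d :: dtl := by
          rw [← hsplit2, List.drop_left]
        have hshift := sliceSeq_shift (c :: rest) run.length (cutsB (d :: dtl) ++ [(d :: dtl).length]) 0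
        rw [Nat.zero_add] at hshift
        rw [hshift, hdrop, htake]
        congr 1
        have hrl : 1 ≤ run.length := by rw [hrundef]; simp
        exact ih (d :: dtl) (by simp only [List.length_cons] at hle hlen2 ⊢; omega) (by simp)

theorem sliceSeq_eq_groupRuns (l : List Char) (hl : l ≠ []) :
    sliceSeq l 0 (cutsB l ++ [l.length]) = groupRuns l :=
  sliceSeq_eq_groupRuns_aux l.length l le_rfl hl

-- ===== VERDICT (by name: the statement is the Claim_ definition above) =====
theorem getSplittedFormula_spec : Claim_equal_getSplittedFormula := by
  intro myList _
  unfold Spec_getSplittedFormula getSplittedFormula getSplittedFormula_alt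
  cases h : myList.toList with
  | nil => simp [loopA]
  | cons c rest =>
    rw [loopA_eq_groupRuns]
    rw [if_neg (by simp)]
    show (groupRuns (c :: rest)).map String.mk =
      List.map (fun ab : ℕ × ℕ => String.mk ((List.drop ab.1 (c :: rest)).take (ab.2 - ab.1)))
        ((0 :: (cutsB (c :: rest) ++ [(c :: rest).length])).zip (cutsB (c :: rest) ++ [(c :: rest).length]))
    rw [show (fun ab : ℕ × ℕ => String.mk ((List.drop ab.1 (c :: rest)).take (ab.2 - ab.1)))
          = String.mk ∘ (fun ab : ℕ × ℕ => (List.drop ab.1 (c :: rest)).take (ab.2 - ab.1)) from rfl]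
    rw [← List.map_map, zip_map_eq_sliceSeq, sliceSeq_eq_groupRuns (c :: rest) (by simp)]
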